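-- pv_equiv track=rewrite | github.com/micahkberg/Advent-of-Code-2023 | Day-14.py | weight_on_north_beams
-- ===== SOURCE A (Python) =====
-- def weight_on_north_beams(rock_grid):
--     weight = 0
--     for col in range(len(rock_grid[0])):
--         for row in range(len(rock_grid)):
--             tile = rock_grid[row][col]
--             if tile == "O":
--                 weight += len(rock_grid) - row
--     return weight
-- ===== SOURCE B (Python) =====
-- def weight_on_north_beams(rock_grid):
--     # Running-accumulator scheme: a rock in row i is added into `seen` at step i
--     # and `seen` is added into `total` at every step from i on, so the rock
--     # contributes (n - i) in total -- no per-cell weight multiplication needed.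
--     width = len(rock_grid[0])
--     total = 0
--     seen = 0
--     for row in rock_grid:
--         seen += row[:width].count("O")
--         total += seen
--     return total
-- ===== Notes on version B (the rewrite author's own statement) =====
-- stated objective: alternative
-- what changed: Replaces the column-major nested scan with per-cell weight terms (n-row) by a single forward pass keeping a running prefix-sum of rocks seen ('seen') and accumulating it into the total each row, so no weight factor is ever multiplied; each row's rock count is taken over the first len(grid[0]) cells.
import Mathlib
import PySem

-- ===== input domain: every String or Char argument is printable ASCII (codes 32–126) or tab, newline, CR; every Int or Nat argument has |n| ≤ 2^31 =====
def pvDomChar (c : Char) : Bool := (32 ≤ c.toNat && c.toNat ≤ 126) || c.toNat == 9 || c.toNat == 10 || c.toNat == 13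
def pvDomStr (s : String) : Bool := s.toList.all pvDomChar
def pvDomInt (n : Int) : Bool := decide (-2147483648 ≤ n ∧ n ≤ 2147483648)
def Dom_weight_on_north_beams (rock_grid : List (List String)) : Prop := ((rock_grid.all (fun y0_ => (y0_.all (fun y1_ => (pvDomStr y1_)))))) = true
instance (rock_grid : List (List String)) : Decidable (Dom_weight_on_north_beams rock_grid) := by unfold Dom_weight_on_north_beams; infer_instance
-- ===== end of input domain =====

-- B replaces A's column-major per-cell weighting by a single forward pass with a running
-- prefix-sum accumulator (no weight multiplication); objective: alternative decomposition.

-- ===== PORT A =====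
def weight_on_north_beams (rock_grid : List (List String)) : Int :=
  (PySem.List.pyRange 0 ((PySem.List.pyGetD rock_grid 0 []).length : Int) 1).foldl
    (fun weight col =>
      (PySem.List.pyRange 0 (rock_grid.length : Int) 1).foldl
        (fun weight row =>
          let tile := PySem.List.pyGetD (PySem.List.pyGetD rock_grid row []) col ""
          if tile = "O" then weight + ((rock_grid.length : Int) - row) else weight)
        weight)
    0

-- ===== PORT B =====
def weight_on_north_beams_alt (rock_grid : List (List String)) : Int :=
  let width : Nat := (PySem.List.pyGetD rock_grid 0 []).length
  (rock_grid.foldl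
    (fun (s : Int × Int) row =>
      let seen := s.2 + ((PySem.List.count (PySem.List.slice row (some 0) (some (width : Int))) "O" : Nat) : Int)
      (s.1 + seen, seen))
    ((0 : Int), (0 : Int))).1

-- ===== PRECONDITION & SPEC =====
-- Pre_ excludes exactly the inputs where A raises IndexError: the empty grid
-- (rock_grid[0]) and grids with a row shorter than the first row (rock_grid[row][col]).
def Pre_weight_on_north_beams (rock_grid : List (List String)) : Prop :=
  rock_grid ≠ [] ∧ ∀ row ∈ rock_grid, (rock_grid.headD []).length ≤ row.length
instance (rock_grid : List (List String)) : Decidable (Pre_weight_on_north_beams rock_grid) := by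
  unfold Pre_weight_on_north_beams; infer_instance
def pvWitness_weight_on_north_beams : List (List String) := [["O", "."], [".", "O"]]

def Spec_weight_on_north_beams (rock_grid : List (List String)) (out : Int) : Prop :=
  out = weight_on_north_beams_alt rock_grid
instance (rock_grid : List (List String)) (out : Int) : Decidable (Spec_weight_on_north_beams rock_grid out) := by
  unfold Spec_weight_on_north_beams; infer_instance

-- ===== CLAIM (what is proved, stated in full; the proofs are below) =====
def Claim_equal_weight_on_north_beams : Prop := ∀ (rock_grid : List (List String)), Dom_weight_on_north_beams rock_grid → Pre_weight_on_north_beams rock_grid → Spec_weight_on_north_beams rock_grid (weight_on_north_beams rock_grid)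

-- ===== LEMMAS AND PROOFS =====

lemma sum_map_range_int (n : Nat) (f : Nat → Int) :
    ((List.range n).map f).sum = ∑ i ∈ Finset.range n, f i := by
  induction n with
  | zero => simp
  | succ k ih => rw [List.range_succ, Finset.sum_range_succ]; simp [ih]

-- one row's contribution: the 0/1 index sum over the first w cells is the count in the prefix
lemma row_count_lemma (row : List String) (w : Nat) (hw : w ≤ row.length) :
    (∑ c ∈ Finset.range w, (if row.getD c "" = "O" then (1 : Int) else 0))
      = ((row.take w).count "O" : Int) := by
  induction w with
  | zero => simp
  | succ k ih =>
    have hlt : k < row.length := hw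
    have hrk : row[k]? = some row[k] := List.getElem?_eq_getElem hlt
    rw [Finset.sum_range_succ, ih (Nat.le_of_succ_le hw), List.take_add_one, hrk]
    rw [List.count_append]
    simp only [List.getD, hrk, Option.getD_some, Option.toList_some, List.count_singleton]
    push_cast
    by_cases h : row[k] = "O" <;> simp [h]

-- B's running-accumulator fold computes init-total + len·init-seen + the weighted row sum
lemma fold_accum (f : List String → Int) :
    ∀ (g : List (List String)) (t0 a0 : Int),
    (g.foldl (fun (s : Int × Int) row => let seen := s.2 + f row; (s.1 + seen, seen)) (t0, a0)).1
      = t0 + (g.length : Int) * a0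
          + ∑ i ∈ Finset.range g.length, ((g.length : Int) - i) * f (g.getD i []) := by
  intro g
  induction g with
  | nil => intro t0 a0; simp
  | cons r gs ih =>
    intro t0 a0
    simp only [List.foldl_cons]
    rw [ih]
    simp only [List.length_cons]
    rw [Finset.sum_range_succ']
    simp only [List.getD_cons_succ, List.getD_cons_zero]
    have hs : ∀ i ∈ Finset.range gs.length,
        (((gs.length : Int) + 1) - ((i : Nat) + 1 : Nat)) * f (gs.getD i [])
          = ((gs.length : Int) - i) * f (gs.getD i []) := by
      intro i _; push_cast; ring
    push_cast
    push_cast at hs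
    rw [Finset.sum_congr rfl hs]
    ring

lemma weight_main (g : List (List String)) (hne : g ≠ [])
    (hall : ∀ row ∈ g, (g.headD []).length ≤ row.length) :
    weight_on_north_beams g = weight_on_north_beams_alt g := by
  unfold weight_on_north_beams weight_on_north_beams_alt
  rw [PySem.List.pyGetD_ofNat']
  set w := (g.getD 0 []).length with hw
  set n := g.length with hn
  have hwle : ∀ r : Nat, r < n → w ≤ (g.getD r []).length := by
    intro r hr
    have hmem : g.getD r [] ∈ g := by
      have : g[r]? = some (g.getD r []) := by
        simp [List.getD, List.getElem?_eq_getElem hr]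
      exact List.mem_of_getElem? this
    have hhd : g.headD [] = g.getD 0 [] := by
      cases g with
      | nil => simp at hne
      | cons a t => simp [List.getD]
    have h1 := hall _ hmem
    rw [hhd] at h1
    exact h1
  -- A side: the nested column-major fold is the double index sum
  have hA : (PySem.List.pyRange 0 (w : Int) 1).foldl
      (fun weight col =>
        (PySem.List.pyRange 0 (n : Int) 1).foldl
          (fun weight row =>
            if PySem.List.pyGetD (PySem.List.pyGetD g row []) col "" = "O" then
              weight + ((n : Int) - row) else weight)
          weight)
      0
      = ∑ c ∈ Finset.range w, ∑ r ∈ Finset.range n,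
          (if (g.getD r []).getD c "" = "O" then (n : Int) - r else 0) := by
    rw [PySem.List.pyRange_zero_natCast, PySem.List.pyRange_zero_natCast, List.foldl_map]
    rw [PySem.List.foldl_congr_mem _ _
      (fun acc (c : Nat) => acc + ∑ r ∈ Finset.range n,
        (if (g.getD r []).getD c "" = "O" then (n : Int) - r else 0)) _ ?_]
    · rw [PySem.List.foldl_add, sum_map_range_int, zero_add]
    · intro acc c _
      rw [List.foldl_map]
      rw [PySem.List.foldl_congr_mem _ _
        (fun acc (r : Nat) => acc + (if (g.getD r []).getD c "" = "O" then (n : Int) - r else 0)) _ ?_]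
      · rw [PySem.List.foldl_add, sum_map_range_int]
      · intro acc r _
        simp only [PySem.List.pyGetD_natCast]
        split_ifs <;> simp
  rw [hA, Finset.sum_comm]
  -- B side: the running-accumulator fold is the weighted row sum
  rw [fold_accum (fun row =>
        ((PySem.List.count (PySem.List.slice row (some 0) (some (w : Int))) "O" : Nat) : Int)) g 0 0]
  rw [mul_zero, add_zero, zero_add, ← hn]
  apply Finset.sum_congr rfl
  intro r hr
  have hr' : r < n := Finset.mem_range.mp hr
  have hwr := hwle r hr'
  simp only [PySem.List.slice_zero_start, PySem.List.slice_to_natCast, PySem.List.count_eq]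
  rw [← row_count_lemma _ w hwr, Finset.mul_sum]
  apply Finset.sum_congr rfl
  intro c _
  split_ifs <;> ring

-- ===== VERDICT (by name: the statement is the Claim_ definition above) =====
theorem weight_on_north_beams_spec : Claim_equal_weight_on_north_beams := by
  intro g _ hpre
  unfold Spec_weight_on_north_beams
  exact weight_main g hpre.1 hpre.2
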